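-- pv_equiv track=rewrite | github.com/fialco/adventofcode-2023 | day15/day15.py | library
-- ===== SOURCE A (Python) =====
-- def library(info): #pt1
--     info = info.split(",")
--     result = []
--     for command in info:
--         total = 0
--         for character in command:
--             total += ord(character)
--             total *= 17
--             total %= 256
--         result.append(total)
--     return sum(result)
-- ===== SOURCE B (Python) =====
-- def library(info):
--     # Single pass over the raw string: a comma flushes the running hash into the
--     # grand total instead of first building the list of commands and their hashes.
--     total = 0
--     result = 0
--     for ch in info:
--         if ch == ',':
--             result += total
--             total = 0
--         else:
--             total = (total + ord(ch)) * 17 % 256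
--     return result + total
-- ===== Notes on version B (the rewrite author's own statement) =====
-- stated objective: alternative
-- what changed: B replaces split-into-commands + per-command hash list + sum by one pass over the raw string with two integer accumulators, flushing the running hash at each comma; no intermediate lists are built.
import Mathlib
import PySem

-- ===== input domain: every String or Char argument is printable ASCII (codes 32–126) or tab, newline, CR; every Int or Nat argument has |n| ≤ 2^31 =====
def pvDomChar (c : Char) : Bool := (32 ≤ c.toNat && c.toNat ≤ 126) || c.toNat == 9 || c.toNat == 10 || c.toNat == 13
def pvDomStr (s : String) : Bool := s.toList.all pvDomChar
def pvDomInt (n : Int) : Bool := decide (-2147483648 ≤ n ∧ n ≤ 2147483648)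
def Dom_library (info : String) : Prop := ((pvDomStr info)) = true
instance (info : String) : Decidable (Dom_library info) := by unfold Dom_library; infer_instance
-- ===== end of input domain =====

-- B replaces split + per-command hash list + sum by a single pass over the raw
-- string with two accumulators, flushing the running hash at each comma.


-- ===== PORT A =====
-- info.split(",") → PySem.Chars.splitOn (the non-empty-separator form of str.split)
def library (info : String) : Int :=
  let commands := PySem.Chars.splitOn info.toList [',']
  let result := commands.foldl
    (fun (res : List Int) command =>
      res ++ [command.foldl
        (fun (total : Int) character => PySem.Int.mod ((total + (character.toNat : Int)) * 17) 256)
        0])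
    []
  result.sum

-- ===== PORT B =====
def library_alt (info : String) : Int :=
  let s := info.toList.foldl
    (fun (st : Int × Int) ch =>
      if ch = ',' then (0, st.2 + st.1)
      else (PySem.Int.mod ((st.1 + (ch.toNat : Int)) * 17) 256, st.2))
    (0, 0)
  s.2 + s.1

-- ===== PRECONDITION & SPEC =====
def Spec_library (info : String) (out : Int) : Prop := out = library_alt info
instance (info : String) (out : Int) : Decidable (Spec_library info out) := by unfold Spec_library; infer_instance

-- ===== CLAIM (what is proved, stated in full; the proofs are below) =====
def Claim_equal_library : Prop := ∀ (info : String), Dom_library info → Spec_library info (library info)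

-- ===== LEMMAS AND PROOFS =====

-- one AoC HASH step
def hstep (t : Int) (c : Char) : Int := PySem.Int.mod ((t + (c.toNat : Int)) * 17) 256

-- the comma-split of A, written as a plain structural recursion with an accumulator
def mySplits (l : List Char) (cur : List Char) : List (List Char) :=
  match l with
  | [] => [cur.reverse]
  | c :: rest => if c = ',' then cur.reverse :: mySplits rest [] else mySplits rest (c :: cur)

theorem go_eq (l : List Char) (fuel : Nat) (cur : List Char) (acc : List (List Char))
    (h : l.length ≤ fuel) :
    PySem.Chars.splitOn.go [','] fuel l cur acc = acc.reverse ++ mySplits l cur := by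
  induction l generalizing fuel cur acc with
  | nil =>
    cases fuel with
    | zero => rw [PySem.Chars.splitOn.go.eq_def]; simp [mySplits]
    | succ f => rw [PySem.Chars.splitOn.go.eq_def]; simp [mySplits]
  | cons c rest ih =>
    cases fuel with
    | zero => simp at h
    | succ f =>
      rw [PySem.Chars.splitOn.go.eq_def]
      simp only [List.length_cons] at h
      by_cases hc : c = ','
      · subst hc
        simp only [List.isPrefixOf, Bool.and_eq_true, beq_iff_eq]
        simp only [List.length_cons, List.length_nil, List.drop_succ_cons, List.drop_zero, and_self,
          if_true]
        rw [ih f [] (cur.reverse :: acc) (by omega)]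
        simp [mySplits]
      · simp only [List.isPrefixOf, Bool.and_eq_true, beq_iff_eq]
        rw [if_neg (by simp [Ne.symm hc])]
        rw [ih _ _ _ (by omega)]
        simp [mySplits, hc]

theorem splitOn_comma (l : List Char) :
    PySem.Chars.splitOn l [','] = mySplits l [] := by
  rw [PySem.Chars.splitOn]; rw [go_eq _ _ _ _ (by omega)]; simp

-- B's single pass computes r + the sum of A's per-piece hashes, for any carried state
theorem b_loop_eq (l : List Char) (t r : Int) (cur : List Char)
    (ht : t = cur.reverse.foldl hstep 0) :
    (l.foldl
      (fun (st : Int × Int) ch =>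
        if ch = ',' then (0, st.2 + st.1)
        else (PySem.Int.mod ((st.1 + (ch.toNat : Int)) * 17) 256, st.2))
      (t, r)).2
    + (l.foldl
      (fun (st : Int × Int) ch =>
        if ch = ',' then (0, st.2 + st.1)
        else (PySem.Int.mod ((st.1 + (ch.toNat : Int)) * 17) 256, st.2))
      (t, r)).1
    = r + ((mySplits l cur).map (fun p => p.foldl hstep 0)).sum := by
  induction l generalizing t r cur with
  | nil => simp [mySplits, ht]
  | cons c rest ih =>
    by_cases hc : c = ','
    · subst hc
      simp only [List.foldl_cons, mySplits, if_true, List.map_cons, List.sum_cons]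
      rw [ih 0 (r + t) [] (by simp)]
      rw [ht]; ring
    · simp only [List.foldl_cons, mySplits, hc, if_false]
      rw [ih _ r (c :: cur) (by rw [ht]; simp [List.foldl_append, hstep])]

theorem library_spec : Claim_equal_library := by
  intro info _
  unfold Spec_library
  show ((PySem.Chars.splitOn info.toList [',']).foldl
      (fun (res : List Int) command =>
        res ++ [command.foldl
          (fun (total : Int) character => PySem.Int.mod ((total + (character.toNat : Int)) * 17) 256)
          0])
      []).sum
    = (info.toList.foldl
        (fun (st : Int × Int) ch =>
          if ch = ',' then (0, st.2 + st.1)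
          else (PySem.Int.mod ((st.1 + (ch.toNat : Int)) * 17) 256, st.2))
        (0, 0)).2
      + (info.toList.foldl
        (fun (st : Int × Int) ch =>
          if ch = ',' then (0, st.2 + st.1)
          else (PySem.Int.mod ((st.1 + (ch.toNat : Int)) * 17) 256, st.2))
        (0, 0)).1
  rw [splitOn_comma]
  have hmap : (mySplits info.toList []).foldl
      (fun (res : List Int) command =>
        res ++ [command.foldl
          (fun (total : Int) character => PySem.Int.mod ((total + (character.toNat : Int)) * 17) 256)
          0])
      []
    = (mySplits info.toList []).map (fun p => p.foldl hstep 0) := by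
    rw [PySem.List.foldl_append_singleton_eq_map]
    rfl
  rw [hmap]
  rw [b_loop_eq info.toList 0 0 [] (by simp)]
  simp
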